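-- pv_equiv track=rewrite | github.com/Sanguor/AoC-2023 | day03/gear_ratios.py | browse_engine_without_spoting_symbol
-- ===== SOURCE A (Python) =====
-- def browse_number(engine, y, x):
--     nb = ""
--     nb_pos = x
--
--     while nb_pos < len(engine[y]) and engine[y][nb_pos].isnumeric():
--         nb += engine[y][nb_pos]
--         nb_pos += 1
--
--     return [int(nb), nb_pos - 1]
--
-- def browse_engine_without_spoting_symbol(engine):
--     sum = 0
--     nb = list()
--     line = 0
--
--     for col in range(len(engine)):
--         while line < len(engine[col]):
--             if engine[col][line].isnumeric():
--                 nb = browse_number(engine, col, line)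
--                 sum += nb[0]
--                 line = nb[1]
--             line += 1
--         line = 0
--     return sum
-- ===== SOURCE B (Python) =====
-- def browse_engine_without_spoting_symbol(engine):
--     total = 0
--     for row in engine:
--         num = 0
--         for ch in row:
--             if ch.isnumeric():
--                 num = num * 10 + int(ch)
--             else:
--                 total += num
--                 num = 0
--         total += num
--     return total
-- ===== Notes on version B (the rewrite author's own statement) =====
-- stated objective: simpler
-- what changed: Replaced the cursor-driven while-loop with the browse_number helper (which returns [value, end_index] and resets the cursor) by a single left-to-right fold per row that carries (running total, current number) and flushes the number at each non-digit character and at end of row.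
import Mathlib
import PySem

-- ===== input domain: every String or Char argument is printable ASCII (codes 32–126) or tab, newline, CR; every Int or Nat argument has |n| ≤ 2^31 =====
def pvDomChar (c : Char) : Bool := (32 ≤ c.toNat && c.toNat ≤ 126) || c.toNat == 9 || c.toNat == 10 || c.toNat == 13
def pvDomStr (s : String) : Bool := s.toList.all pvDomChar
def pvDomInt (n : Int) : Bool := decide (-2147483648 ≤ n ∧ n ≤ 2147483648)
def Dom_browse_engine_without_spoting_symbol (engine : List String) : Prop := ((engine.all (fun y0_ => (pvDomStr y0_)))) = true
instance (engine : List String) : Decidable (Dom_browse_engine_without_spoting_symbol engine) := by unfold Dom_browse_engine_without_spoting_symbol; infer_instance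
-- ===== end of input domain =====

-- B replaces A's cursor-driven while-loop and browse_number helper (which returns [value, end_index])
-- with a single left-to-right fold per row that carries (total, current number) — objective: simpler.
-- On the ASCII domain Dom, Python's str.isnumeric is exactly PySem.Chars.isdigit, and int() on the
-- digit runs the code builds is exactly the base-10 digit fold used below; both ports use these.

-- ===== PORT A =====
-- The while-loop of browse_number: collect consecutive digit characters of `row` from `pos` into
-- `nb`, return (nb, final_pos - 1), exactly as the Python loop does. `fuel` only makes the loop
-- structurally total; `row.length - pos` steps always suffice, so it never changes the result.
def pvBnAux : Nat → List Char → Nat → List Char → List Char × Nat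
  | 0, _, pos, nb => (nb, pos - 1)
  | fuel + 1, row, pos, nb =>
    if h : pos < row.length then
      if PySem.Chars.isdigit row[pos] then pvBnAux fuel row (pos + 1) (nb ++ [row[pos]])
      else (nb, pos - 1)
    else (nb, pos - 1)

-- int(nb), ported by hand: on Dom the strings browse_number builds are nonempty runs of '0'..'9',
-- on which Python's int() is exactly this base-10 fold.
def pvIntOfDigits (nb : List Char) : Int :=
  nb.foldl (fun n c => n * 10 + ((c.toNat : Int) - 48)) 0

-- browse_number(engine, y, x), receiving engine[y] as `row` (the helper reads only that line).
def pvBrowseNumber (row : List Char) (x : Nat) : Int × Nat :=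
  let r := pvBnAux (row.length - x) row x []
  (pvIntOfDigits r.1, r.2)

-- the inner `while line < len(engine[col])` loop of A, on row = engine[col]; again `fuel` is only
-- a structural-totality guard — the cursor advances every iteration, so `row.length - line` steps suffice
def pvRowLoop : Nat → List Char → Nat → Int → Int
  | 0, _, _, s => s
  | fuel + 1, row, line, s =>
    if h : line < row.length then
      if PySem.Chars.isdigit row[line] then
        let nb := pvBrowseNumber row line
        pvRowLoop fuel row (nb.2 + 1) (s + nb.1)
      else pvRowLoop fuel row (line + 1) s
    else s

def browse_engine_without_spoting_symbol (engine : List String) : Int :=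
  (PySem.List.pyRange 0 (engine.length : Int) 1).foldl
    (fun s col =>
      pvRowLoop (PySem.List.pyGetD engine col "").toList.length
        (PySem.List.pyGetD engine col "").toList 0 s) 0

-- ===== PORT B =====
def browse_engine_without_spoting_symbol_alt (engine : List String) : Int :=
  engine.foldl
    (fun total row =>
      let p := row.toList.foldl
        (fun (st : Int × Int) ch =>
          if PySem.Chars.isdigit ch then (st.1, st.2 * 10 + ((ch.toNat : Int) - 48))
          else (st.1 + st.2, 0)) (total, 0)
      p.1 + p.2) 0

-- ===== PRECONDITION & SPEC =====
def Spec_browse_engine_without_spoting_symbol (engine : List String) (out : Int) : Prop := out = browse_engine_without_spoting_symbol_alt engine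
instance (engine : List String) (out : Int) : Decidable (Spec_browse_engine_without_spoting_symbol engine out) := by unfold Spec_browse_engine_without_spoting_symbol; infer_instance

-- ===== CLAIM (what is proved, stated in full; the proofs are below) =====
def Claim_equal_browse_engine_without_spoting_symbol : Prop := ∀ (engine : List String), Dom_browse_engine_without_spoting_symbol engine → Spec_browse_engine_without_spoting_symbol engine (browse_engine_without_spoting_symbol engine)

-- ===== LEMMAS AND PROOFS =====

-- B's per-character step of the inner fold
def pvStep (st : Int × Int) (ch : Char) : Int × Int :=
  if PySem.Chars.isdigit ch then (st.1, st.2 * 10 + ((ch.toNat : Int) - 48))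
  else (st.1 + st.2, 0)

theorem pvIntOfDigits_append (nb : List Char) (c : Char) :
    pvIntOfDigits (nb ++ [c]) = pvIntOfDigits nb * 10 + ((c.toNat : Int) - 48) := by
  simp [pvIntOfDigits]

-- the final position of the browse_number loop is never left of where it started
theorem pvBnAux_pos_le (fuel : Nat) (row : List Char) (pos : Nat) (nb : List Char) :
    pos ≤ (pvBnAux fuel row pos nb).2 + 1 := by
  induction fuel generalizing pos nb with
  | zero => simp [pvBnAux]; omega
  | succ fuel ih =>
    rw [pvBnAux]
    split
    next h =>
      split
      next hd => have := ih (pos + 1) (nb ++ [row[pos]]); omega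
      next hd => omega
    next h => omega

-- browse_number never ends left of where it started when it starts on a digit
theorem pvBrowseNumber_snd_ge (row : List Char) (pos : Nat)
    (h : pos < row.length) (hd : PySem.Chars.isdigit row[pos] = true) :
    pos ≤ (pvBrowseNumber row pos).2 := by
  have hfuel : row.length - pos = (row.length - (pos + 1)) + 1 := by omega
  have h1 := pvBnAux_pos_le (row.length - (pos + 1)) row (pos + 1) ([] ++ [row[pos]])
  have h2 : (pvBrowseNumber row pos).2
      = (pvBnAux (row.length - (pos + 1)) row (pos + 1) ([] ++ [row[pos]])).2 := by
    rw [pvBrowseNumber, hfuel, pvBnAux]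
    simp [h, hd]
  omega

-- the browse_number run, seen from B's fold: folding from position pos with current number
-- value pvIntOfDigits nb equals flushing the completed run and folding on after it
theorem pvBnAux_fold (fuel : Nat) (row : List Char) (pos : Nat) (nb : List Char) (s : Int)
    (hf : row.length ≤ pos + fuel) :
    ((row.drop pos).foldl pvStep (s, pvIntOfDigits nb)).1
      + ((row.drop pos).foldl pvStep (s, pvIntOfDigits nb)).2
    = ((row.drop ((pvBnAux fuel row pos nb).2 + 1)).foldl pvStep
          (s + pvIntOfDigits (pvBnAux fuel row pos nb).1, 0)).1
      + ((row.drop ((pvBnAux fuel row pos nb).2 + 1)).foldl pvStep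
          (s + pvIntOfDigits (pvBnAux fuel row pos nb).1, 0)).2 := by
  induction fuel generalizing pos nb with
  | zero =>
    have hd1 : row.drop pos = [] := List.drop_eq_nil_of_le (by omega)
    have hd2 : row.drop (pos - 1 + 1) = [] := List.drop_eq_nil_of_le (by omega)
    simp only [pvBnAux]
    rw [hd1, hd2]
    simp
  | succ fuel ih =>
    rw [pvBnAux]
    by_cases h : pos < row.length
    · rw [dif_pos h]
      by_cases hd : PySem.Chars.isdigit row[pos] = true
      · rw [if_pos hd, List.drop_eq_getElem_cons h]
        have hstep : pvStep (s, pvIntOfDigits nb) row[pos]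
            = (s, pvIntOfDigits (nb ++ [row[pos]])) := by
          simp [pvStep, hd, pvIntOfDigits_append]
        simp only [List.foldl_cons, hstep]
        exact ih (pos + 1) (nb ++ [row[pos]]) (by omega)
      · rw [if_neg hd]
        simp only
        have hl : row.drop pos = row[pos] :: row.drop (pos + 1) := List.drop_eq_getElem_cons h
        have h1 : pvStep (s, pvIntOfDigits nb) row[pos] = (s + pvIntOfDigits nb, 0) := by
          simp [pvStep, hd]
        by_cases hp : pos = 0
        · subst hp
          rw [hl]
          simp only [List.foldl_cons, h1]
        · have hp' : pos - 1 + 1 = pos := by omega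
          have h2 : pvStep (s + pvIntOfDigits nb, 0) row[pos]
              = (s + pvIntOfDigits nb + 0, 0) := by simp [pvStep, hd]
          rw [hp', hl]
          simp only [List.foldl_cons, h1, h2, add_zero]
    · rw [dif_neg h]
      simp only
      have hd1 : row.drop pos = [] := List.drop_eq_nil_of_le (by omega)
      have hd2 : row.drop (pos - 1 + 1) = [] := List.drop_eq_nil_of_le (by omega)
      rw [hd1, hd2]
      simp

-- A's inner while-loop computes exactly B's per-row fold
theorem pvRowLoop_eq (fuel : Nat) (row : List Char) (line : Nat) (s : Int)
    (hf : row.length ≤ line + fuel) :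
    pvRowLoop fuel row line s
      = ((row.drop line).foldl pvStep (s, 0)).1 + ((row.drop line).foldl pvStep (s, 0)).2 := by
  induction fuel generalizing line s with
  | zero =>
    rw [List.drop_eq_nil_of_le (by omega)]
    simp [pvRowLoop]
  | succ fuel ih =>
    rw [pvRowLoop]
    by_cases h : line < row.length
    · rw [dif_pos h]
      by_cases hd : PySem.Chars.isdigit row[line] = true
      · rw [if_pos hd]
        simp only
        have hge := pvBrowseNumber_snd_ge row line h hd
        rw [ih ((pvBrowseNumber row line).2 + 1) (s + (pvBrowseNumber row line).1) (by omega)]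
        have key := pvBnAux_fold (row.length - line) row line [] s (by omega)
        have h0 : pvIntOfDigits ([] : List Char) = 0 := rfl
        rw [h0] at key
        exact key.symm
      · rw [if_neg hd, ih (line + 1) s (by omega), List.drop_eq_getElem_cons h]
        simp only [List.foldl_cons]
        have hstep : pvStep (s, 0) row[line] = (s + 0, 0) := by simp [pvStep, hd]
        rw [hstep, add_zero]
    · rw [dif_neg h, List.drop_eq_nil_of_le (by omega)]
      simp

-- ===== VERDICT (by name: the statement is the Claim_ definition above) =====
theorem browse_engine_without_spoting_symbol_spec : Claim_equal_browse_engine_without_spoting_symbol := by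
  intro engine _
  unfold Spec_browse_engine_without_spoting_symbol
  unfold browse_engine_without_spoting_symbol browse_engine_without_spoting_symbol_alt
  rw [PySem.List.foldl_pyRange_zero_pyGetD' engine ""
      (fun s r => pvRowLoop r.toList.length r.toList 0 s) 0]
  refine List.foldl_ext _ _ 0 (fun total row _ => ?_)
  rw [pvRowLoop_eq row.toList.length row.toList 0 total (by omega), List.drop_zero]
  rfl
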